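-- pv_equiv track=rewrite | github.com/luidale/starpa | src/starpa/pseudoSE.py | change_add_extra_tag
-- ===== SOURCE A (Python) =====
-- def change_add_extra_tag(tag,tag_value,list_sam):
--     '''
--     Change or add (if missing) tag to read in sam format
--     '''
--     extra_tags = list_sam[11:]
--     tag_index = [i for i, j in enumerate(extra_tags) if j.startswith(tag)]
--     #tag does not exist
--     if tag_index == []:
--         list_sam.append(tag+str(tag_value))
--     else:
--         for i,x in enumerate(tag_index):
--             extra_tags[tag_index[i]] = tag+str(tag_value)
--             list_sam = list_sam[:11]+extra_tags
--     return list_sam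
-- ===== SOURCE B (Python) =====
-- def change_add_extra_tag(tag, tag_value, list_sam):
--     '''Change or add (if missing) tag to read in sam format'''
--     new_tags = []
--     found = False
--     for x in list_sam[11:]:
--         if x.startswith(tag):
--             new_tags.append(tag + str(tag_value))
--             found = True
--         else:
--             new_tags.append(x)
--     if found:
--         return list_sam[:11] + new_tags
--     list_sam.append(tag + str(tag_value))
--     return list_sam
-- ===== Notes on version B (the rewrite author's own statement) =====
-- stated objective: simpler
-- what changed: Drops the intermediate tag_index list and the index-based rewrite loop; a single direct pass over the extra tags replaces matching entries and records a found flag, then appends only if nothing matched.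
import Mathlib
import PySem

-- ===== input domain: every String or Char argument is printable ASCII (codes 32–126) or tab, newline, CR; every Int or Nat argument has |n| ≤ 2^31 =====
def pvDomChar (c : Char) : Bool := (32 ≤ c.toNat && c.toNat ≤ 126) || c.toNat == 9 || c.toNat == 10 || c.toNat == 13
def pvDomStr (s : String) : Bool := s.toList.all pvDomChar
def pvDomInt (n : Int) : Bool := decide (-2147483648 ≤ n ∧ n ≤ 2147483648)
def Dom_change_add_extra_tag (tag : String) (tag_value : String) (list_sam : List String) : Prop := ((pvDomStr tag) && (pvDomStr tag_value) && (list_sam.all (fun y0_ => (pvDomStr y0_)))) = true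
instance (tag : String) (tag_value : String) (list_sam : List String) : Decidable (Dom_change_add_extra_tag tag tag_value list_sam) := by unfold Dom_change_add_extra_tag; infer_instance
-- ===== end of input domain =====

-- B replaces A's tag_index table + index-rewrite loop by one direct replace-or-flag pass;
-- equivalence is about the RETURN value (both Pythons mutate list_sam only in the no-match case).

-- ===== PORT A =====
def change_add_extra_tag (tag : String) (tag_value : String) (list_sam : List String) : List String :=
  let extra_tags := PySem.List.slice list_sam (some 11) none
  let tag_index :=
    ((PySem.List.enumerate extra_tags 0).filter (fun q => PySem.Str.startswith q.2 tag)).map (·.1)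
  if tag_index = [] then
    list_sam ++ [tag ++ tag_value]
  else
    -- loop state: (extra_tags, list_sam); each iteration sets extra_tags[i] and rebinds list_sam
    (tag_index.foldl
      (fun (st : List String × List String) i =>
        let e := PySem.List.pySetD st.1 i (tag ++ tag_value)
        (e, PySem.List.slice list_sam none (some 11) ++ e))
      (extra_tags, list_sam)).2

-- ===== PORT B =====
-- one forward pass: replace matching entries, flag whether any matched
def replaceTags (tag : String) (tag_value : String) : List String → List String × Bool
  | [] => ([], false)
  | x :: xs =>
    let r := replaceTags tag tag_value xs
    if PySem.Str.startswith x tag then ((tag ++ tag_value) :: r.1, true)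
    else (x :: r.1, r.2)

def change_add_extra_tag_alt (tag : String) (tag_value : String) (list_sam : List String) : List String :=
  let r := replaceTags tag tag_value (PySem.List.slice list_sam (some 11) none)
  if r.2 then PySem.List.slice list_sam none (some 11) ++ r.1
  else list_sam ++ [tag ++ tag_value]

-- ===== PRECONDITION & SPEC =====
def Spec_change_add_extra_tag (tag : String) (tag_value : String) (list_sam : List String) (out : List String) : Prop := out = change_add_extra_tag_alt tag tag_value list_sam
instance (tag : String) (tag_value : String) (list_sam : List String) (out : List String) : Decidable (Spec_change_add_extra_tag tag tag_value list_sam out) := by unfold Spec_change_add_extra_tag; infer_instance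

-- ===== CLAIM (what is proved, stated in full; the proofs are below) =====
def Claim_equal_change_add_extra_tag : Prop := ∀ (tag : String) (tag_value : String) (list_sam : List String), Dom_change_add_extra_tag tag tag_value list_sam → Spec_change_add_extra_tag tag tag_value list_sam (change_add_extra_tag tag tag_value list_sam)

-- ===== LEMMAS AND PROOFS =====

theorem replaceTags_eq (tag tv : String) (xs : List String) :
    replaceTags tag tv xs =
      (xs.map (fun x => if PySem.Str.startswith x tag then tag ++ tv else x),
       xs.any (fun x => PySem.Str.startswith x tag)) := by
  induction xs with
  | nil => simp [replaceTags]
  | cons x xs ih =>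
    simp only [replaceTags, ih, List.map_cons, List.any_cons]
    cases hc : PySem.Str.startswith x tag
    · simp only [Bool.false_eq_true, if_false, Bool.false_or]
    · simp only [if_true, Bool.true_or]

theorem enumerate_fst_nonneg {α : Type} (xs : List α) (s : Int) (hs : 0 ≤ s) :
    ∀ q ∈ PySem.List.enumerate xs s, 0 ≤ q.1 := by
  induction xs generalizing s with
  | nil => simp [PySem.List.enumerate_nil]
  | cons x xs ih =>
    intro q hq
    rw [PySem.List.enumerate_cons] at hq
    rcases List.mem_cons.mp hq with rfl | hq
    · exact hs
    · exact ih (s + 1) (by omega) q hq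

theorem foldl_set_shift (v : String) (x : String) (t : List String) (is : List Int)
    (h : ∀ i ∈ is, 0 ≤ i) :
    (is.map (· + 1)).foldl (fun e i => PySem.List.pySetD e i v) (x :: t)
      = x :: is.foldl (fun e i => PySem.List.pySetD e i v) t := by
  induction is generalizing t with
  | nil => simp
  | cons i is ih =>
    have hi : (0:Int) ≤ i := h i (by simp)
    have hset : PySem.List.pySetD (x :: t) (i + 1) v = x :: PySem.List.pySetD t i v := by
      rw [PySem.List.pySetD_of_nonneg _ _ (by omega), PySem.List.pySetD_of_nonneg _ _ hi]
      have h1 : (i + 1).toNat = i.toNat + 1 := by omega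
      rw [h1, List.set_cons_succ]
    simp only [List.map_cons, List.foldl_cons, hset]
    exact ih (PySem.List.pySetD t i v) (fun j hj => h j (by simp [hj]))

theorem shift_indices (tag : String) (xs : List String) (s : Int) :
    ((PySem.List.enumerate xs (s + 1)).filter (fun q => PySem.Str.startswith q.2 tag)).map (·.1)
      = (((PySem.List.enumerate xs s).filter (fun q => PySem.Str.startswith q.2 tag)).map (·.1)).map (· + 1) := by
  induction xs generalizing s with
  | nil => simp [PySem.List.enumerate_nil]
  | cons x xs ih =>
    rw [PySem.List.enumerate_cons, PySem.List.enumerate_cons, List.filter_cons, List.filter_cons]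
    cases hc : PySem.Str.startswith x tag
    · simp only [Bool.false_eq_true, if_false]
      exact ih (s + 1)
    · simp only [if_true]
      simp only [List.map_cons]
      rw [ih (s + 1)]

theorem index_nonneg (tag : String) (xs : List String) :
    ∀ i ∈ ((PySem.List.enumerate xs 0).filter (fun q => PySem.Str.startswith q.2 tag)).map (·.1),
      0 ≤ i := by
  intro i hi
  rcases List.mem_map.mp hi with ⟨q, hq, rfl⟩
  exact enumerate_fst_nonneg xs 0 (le_refl 0) q (List.mem_of_mem_filter hq)

theorem foldl_set_indices (tag v : String) (xs : List String) :
    (((PySem.List.enumerate xs 0).filter (fun q => PySem.Str.startswith q.2 tag)).map (·.1)).foldl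
        (fun e i => PySem.List.pySetD e i v) xs
      = xs.map (fun x => if PySem.Str.startswith x tag then v else x) := by
  induction xs with
  | nil => simp [PySem.List.enumerate_nil]
  | cons x xs ih =>
    rw [PySem.List.enumerate_cons, List.filter_cons]
    cases hc : PySem.Str.startswith x tag
    · simp only [Bool.false_eq_true, if_false]
      rw [shift_indices, foldl_set_shift v x xs _ (index_nonneg tag xs), ih]
      simp only [List.map_cons, hc, Bool.false_eq_true, if_false]
    · simp only [if_true, List.map_cons, List.foldl_cons]
      have h0 : PySem.List.pySetD (x :: xs) (0 : Int) v = v :: xs := by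
        rw [PySem.List.pySetD_of_nonneg _ _ (by norm_num)]
        rfl
      rw [h0]
      rw [shift_indices]
      rw [foldl_set_shift v v xs _ (index_nonneg tag xs)]
      rw [ih, if_pos hc]

theorem foldl_pair_snd (v : String) (pre : List String) (is : List Int) (e s : List String)
    (h : is ≠ []) :
    (is.foldl (fun (st : List String × List String) i =>
        (PySem.List.pySetD st.1 i v, pre ++ PySem.List.pySetD st.1 i v)) (e, s)).2
      = pre ++ is.foldl (fun e i => PySem.List.pySetD e i v) e := by
  induction is generalizing e s with
  | nil => exact absurd rfl h
  | cons i is ih =>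
    by_cases his : is = []
    · subst his; simp
    · simp only [List.foldl_cons]
      exact ih (PySem.List.pySetD e i v) _ his

theorem tag_index_nil_iff (tag : String) (xs : List String) :
    (((PySem.List.enumerate xs 0).filter (fun q => PySem.Str.startswith q.2 tag)).map (·.1) = []) ↔
      xs.any (fun x => PySem.Str.startswith x tag) = false := by
  rw [List.map_eq_nil_iff, List.filter_eq_nil_iff, List.any_eq_false]
  constructor
  · intro h x hx
    rcases List.getElem_of_mem hx with ⟨k, hk, rfl⟩
    have := h ((0 + (k : Int)), xs[k]) (by
      rw [PySem.List.mem_enumerate_iff]; exact ⟨k, hk, rfl⟩)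
    simpa using this
  · intro h q hq
    rw [PySem.List.mem_enumerate_iff] at hq
    rcases hq with ⟨k, hk, rfl⟩
    simpa using h xs[k] (List.getElem_mem hk)

-- ===== VERDICT (by name: the statement is the Claim_ definition above) =====
theorem change_add_extra_tag_spec : Claim_equal_change_add_extra_tag := by
  intro tag tv ls _
  unfold Spec_change_add_extra_tag change_add_extra_tag change_add_extra_tag_alt
  simp only [replaceTags_eq]
  by_cases h : ((PySem.List.enumerate (PySem.List.slice ls (some 11) none) 0).filter
      (fun q => PySem.Str.startswith q.2 tag)).map (·.1) = []
  · have hf := (tag_index_nil_iff tag _).mp h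
    rw [if_pos h, if_neg (by simp only [hf]; decide)]
  · have ht : (PySem.List.slice ls (some 11) none).any (fun x => PySem.Str.startswith x tag) = true := by
      cases h' : (PySem.List.slice ls (some 11) none).any (fun x => PySem.Str.startswith x tag)
      · exact absurd ((tag_index_nil_iff tag _).mpr h') h
      · rfl
    rw [if_neg h, if_pos ht, foldl_pair_snd _ _ _ _ _ h, foldl_set_indices]
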